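-- pv_equiv track=rewrite | github.com/Keff789/ONNX-Splitpoint-Tool | onnx_splitpoint_tool/metrics.py | boundary_costs
-- ===== SOURCE A (Python) =====
-- from typing import Dict, Iterable, List, Optional, Tuple
--
-- def boundary_costs(
--     order: List[int],
--     producer_of: Dict[str, int],
--     consumers_of: Dict[str, List[int]],
--     value_bytes: Dict[str, int],
-- ) -> Tuple[List[int], Dict[str, Tuple[int, int]]]:
--     """Compute Comm(b) for all boundaries and return (costs, val_span).
--
--     val_span maps value_name -> (producer_position, last_consumer_position).
--     Only values with a positive byte size are included.
--     """
--     N = len(order)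
--     M = max(0, N - 1)
--     if M == 0:
--         return [], {}
--
--     pos_of = {node_idx: pos for pos, node_idx in enumerate(order)}
--
--     deltas = [0] * (M + 1)
--     val_span: Dict[str, Tuple[int, int]] = {}
--
--     for val, p_node in producer_of.items():
--         b = int(value_bytes.get(val, 0) or 0)
--         if b <= 0:
--             continue
--         p_pos = int(pos_of[p_node])
--         cons_pos = [int(pos_of[c]) for c in consumers_of.get(val, []) if int(pos_of[c]) > p_pos]
--         if not cons_pos:
--             continue
--         last = int(max(cons_pos))
--         # contributes to boundaries p_pos <= b < last
--         deltas[p_pos] += b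
--         deltas[min(last, M)] -= b
--         val_span[val] = (p_pos, last)
--
--     costs: List[int] = []
--     run = 0
--     for i in range(M):
--         run += deltas[i]
--         costs.append(int(run))
--
--     return costs, val_span
-- ===== SOURCE B (Python) =====
-- from typing import Dict, List, Tuple
--
--
-- def boundary_costs(
--     order: List[int],
--     producer_of: Dict[str, int],
--     consumers_of: Dict[str, List[int]],
--     value_bytes: Dict[str, int],
-- ) -> Tuple[List[int], Dict[str, Tuple[int, int]]]:
--     """Compute Comm(b) for all boundaries and return (costs, val_span).
--
--     Two-stage formulation: first collect the live spans (val, bytes, producer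
--     position, last consumer position) with a running maximum; then each
--     boundary's cost is the sum of bytes of the spans covering it.  No
--     difference array and no prefix-sum pass.
--     """
--     N = len(order)
--     if N <= 1:
--         return [], {}
--     M = N - 1
--
--     pos_of = {node_idx: pos for pos, node_idx in enumerate(order)}
--
--     spans = []
--     for val, p_node in producer_of.items():
--         b = value_bytes.get(val) or 0
--         if b > 0:
--             p = pos_of[p_node]
--             last = p
--             for c in consumers_of.get(val, []):
--                 last = max(last, pos_of[c])
--             if p < last:
--                 spans.append((val, b, p, last))
--
--     costs = [sum(b for _, b, p, l in spans if p <= i < l) for i in range(M)]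
--     val_span = {val: (p, l) for val, _, p, l in spans}
--     return costs, val_span
-- ===== Notes on version B (the rewrite author's own statement) =====
-- stated objective: alternative
-- what changed: Replaces the difference-array + prefix-sum algorithm by a two-stage one: a first pass collects live spans (finding the last consumer with a running maximum instead of max over a filtered list), then each boundary's cost is computed directly as the sum of bytes of the spans covering it (loop nesting swapped: outer over boundaries, inner over spans).
import Mathlib
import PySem

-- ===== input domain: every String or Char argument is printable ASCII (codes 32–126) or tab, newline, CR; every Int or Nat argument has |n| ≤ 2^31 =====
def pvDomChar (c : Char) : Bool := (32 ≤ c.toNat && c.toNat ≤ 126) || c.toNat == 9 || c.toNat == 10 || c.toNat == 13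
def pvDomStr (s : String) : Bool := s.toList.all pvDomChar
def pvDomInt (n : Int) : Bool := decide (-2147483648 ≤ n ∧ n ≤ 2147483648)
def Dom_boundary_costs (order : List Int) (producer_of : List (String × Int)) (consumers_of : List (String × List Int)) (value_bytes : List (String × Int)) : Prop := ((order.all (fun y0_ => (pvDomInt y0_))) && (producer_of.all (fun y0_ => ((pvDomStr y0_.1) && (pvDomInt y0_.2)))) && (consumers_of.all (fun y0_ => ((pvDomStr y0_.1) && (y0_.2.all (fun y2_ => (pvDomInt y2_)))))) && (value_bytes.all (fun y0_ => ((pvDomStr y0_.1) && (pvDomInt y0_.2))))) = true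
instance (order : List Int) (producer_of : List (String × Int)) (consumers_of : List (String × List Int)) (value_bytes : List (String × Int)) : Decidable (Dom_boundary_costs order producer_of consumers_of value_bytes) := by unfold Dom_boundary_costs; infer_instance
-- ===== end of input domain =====

-- B replaces A's difference-array + prefix-sum algorithm by a two-stage one: it first collects
-- the live spans (running-maximum last consumer), then sums the bytes of the spans covering each
-- boundary directly; same return value, objective: alternative.

-- ===== PORT A =====
-- pos_of = {node_idx: pos for pos, node_idx in enumerate(order)} (identical line in A and B)
def pvPosOf (order : List Int) : PySem.Dict Int Int :=
  (PySem.List.enumerate order 0).foldl (fun d p => d.insert p.2 p.1) PySem.Dict.empty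

-- the body of A's `for val, p_node in producer_of.items():` loop; state = (deltas, val_span).
-- pos_of[...] is ported as getD (KeyError excluded by Pre_); `int(value_bytes.get(val, 0) or 0)`
-- is the identity on the int `value_bytes.get(val, 0)`.
def pvStepA (M : Int) (pos_of : PySem.Dict Int Int) (vb : PySem.Dict String Int)
    (co : PySem.Dict String (List Int))
    (st : List Int × PySem.Dict String (Int × Int)) (vp : String × Int) :
    List Int × PySem.Dict String (Int × Int) :=
  let b := vb.getD vp.1 0
  if b ≤ 0 then st
  else
    let p_pos := pos_of.getD vp.2 0
    let cons_pos := ((co.getD vp.1 []).map (fun c => pos_of.getD c 0)).filter (fun q => p_pos < q)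
    if cons_pos = [] then st
    else
      let last := (PySem.List.max? cons_pos (fun y => y)).getD 0
      let deltas := PySem.List.pySetD st.1 p_pos (PySem.List.pyGetD st.1 p_pos 0 + b)
      let deltas := PySem.List.pySetD deltas (min last M) (PySem.List.pyGetD deltas (min last M) 0 - b)
      (deltas, st.2.insert vp.1 (p_pos, last))

def boundary_costs (order : List Int) (producer_of : List (String × Int)) (consumers_of : List (String × List Int)) (value_bytes : List (String × Int)) : List Int × (List (String × Int × Int)) :=
  let N : Int := PySem.List.len order
  let M : Int := max 0 (N - 1)
  if M = 0 then ([], [])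
  else
    let st :=
      (PySem.Dict.ofList producer_of).items.foldl
        (pvStepA M (pvPosOf order) (PySem.Dict.ofList value_bytes) (PySem.Dict.ofList consumers_of))
        (List.replicate (M + 1).toNat 0, PySem.Dict.empty)
    let costs :=
      ((PySem.List.pyRange 0 M 1).foldl
        (fun (rc : Int × List Int) i =>
          (rc.1 + PySem.List.pyGetD st.1 i 0, rc.2 ++ [rc.1 + PySem.List.pyGetD st.1 i 0]))
        (0, [])).2
    (costs, st.2.items)

-- ===== PORT B =====
-- the body of B's span-collecting loop: `b = value_bytes.get(val) or 0` (getD: ints, `or 0` only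
-- maps None/0 to 0), running-maximum `last`, and a span recorded when p < last.
def pvSpanStep (pos_of : PySem.Dict Int Int) (vb : PySem.Dict String Int)
    (co : PySem.Dict String (List Int))
    (spans : List (String × Int × Int × Int)) (vp : String × Int) :
    List (String × Int × Int × Int) :=
  let b := vb.getD vp.1 0
  if 0 < b then
    let p := pos_of.getD vp.2 0
    let last := (co.getD vp.1 []).foldl (fun a c => max a (pos_of.getD c 0)) p
    if p < last then spans ++ [(vp.1, b, p, last)] else spans
  else spans

-- `sum(b for _, b, p, l in spans if p <= i < l)`
def pvSpanSum (spans : List (String × Int × Int × Int)) (i : Int) : Int :=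
  ((spans.filter (fun sp => decide (sp.2.2.1 ≤ i) && decide (i < sp.2.2.2))).map
    (fun sp => sp.2.1)).sum

-- `val_span = {val: (p, l) for val, _, p, l in spans}`
def pvSpanDict (spans : List (String × Int × Int × Int)) : PySem.Dict String (Int × Int) :=
  spans.foldl (fun d sp => d.insert sp.1 (sp.2.2.1, sp.2.2.2)) PySem.Dict.empty

def boundary_costs_alt (order : List Int) (producer_of : List (String × Int)) (consumers_of : List (String × List Int)) (value_bytes : List (String × Int)) : List Int × (List (String × Int × Int)) :=
  let N : Int := PySem.List.len order
  if N ≤ 1 then ([], [])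
  else
    let M := N - 1
    let spans :=
      (PySem.Dict.ofList producer_of).items.foldl
        (pvSpanStep (pvPosOf order) (PySem.Dict.ofList value_bytes)
          (PySem.Dict.ofList consumers_of)) []
    let costs := (PySem.List.pyRange 0 M 1).map (pvSpanSum spans)
    (costs, (pvSpanDict spans).items)

-- ===== PRECONDITION & SPEC =====
-- Pre_ excludes exactly the inputs where Python A raises KeyError: when there are at least
-- two nodes, every value with positive byte size must have its producer node and all of its
-- consumer nodes inside `order` (otherwise pos_of[...] raises).
def Pre_boundary_costs (order : List Int) (producer_of : List (String × Int)) (consumers_of : List (String × List Int)) (value_bytes : List (String × Int)) : Prop :=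
  2 ≤ order.length →
    ∀ vp ∈ (PySem.Dict.ofList producer_of).items,
      0 < (PySem.Dict.ofList value_bytes).getD vp.1 0 →
      vp.2 ∈ order ∧ ∀ c ∈ (PySem.Dict.ofList consumers_of).getD vp.1 [], c ∈ order
instance (order : List Int) (producer_of : List (String × Int)) (consumers_of : List (String × List Int)) (value_bytes : List (String × Int)) : Decidable (Pre_boundary_costs order producer_of consumers_of value_bytes) := by unfold Pre_boundary_costs; infer_instance

def pvWitness_boundary_costs : List Int × (List (String × Int)) × (List (String × List Int)) × (List (String × Int)) :=
  ([3, 7, 5], [("v", 3), ("w", 7)], [("v", [7, 5]), ("w", [5])], [("v", 4), ("w", 2)])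

def Spec_boundary_costs (order : List Int) (producer_of : List (String × Int)) (consumers_of : List (String × List Int)) (value_bytes : List (String × Int)) (out : List Int × (List (String × Int × Int))) : Prop := out = boundary_costs_alt order producer_of consumers_of value_bytes
instance (order : List Int) (producer_of : List (String × Int)) (consumers_of : List (String × List Int)) (value_bytes : List (String × Int)) (out : List Int × (List (String × Int × Int))) : Decidable (Spec_boundary_costs order producer_of consumers_of value_bytes out) := by unfold Spec_boundary_costs; infer_instance

-- ===== CLAIM (what is proved, stated in full; the proofs are below) =====
def Claim_equal_boundary_costs : Prop := ∀ (order : List Int) (producer_of : List (String × Int)) (consumers_of : List (String × List Int)) (value_bytes : List (String × Int)), Dom_boundary_costs order producer_of consumers_of value_bytes → Pre_boundary_costs order producer_of consumers_of value_bytes → Spec_boundary_costs order producer_of consumers_of value_bytes (boundary_costs order producer_of consumers_of value_bytes)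

-- ===== LEMMAS AND PROOFS =====

-- prefix sums of a list after a point update at j shift by the delta exactly from i = j on
theorem pv_sum_take_set (d : List Int) (j : Nat) (x : Int) (hj : j < d.length) (i : Nat) :
    ((d.set j x).take (i + 1)).sum = (d.take (i + 1)).sum + (if j ≤ i then x - d.getD j 0 else 0) := by
  rw [List.take_set]
  by_cases h : j ≤ i
  · have hjlen : j < (d.take (i+1)).length := by simp; omega
    have hsplit : (d.take (i+1)).sum = ((d.take (i+1)).take j).sum + d[j] + ((d.take (i+1)).drop (j+1)).sum := by
      conv_lhs => rw [← List.take_append_drop j (d.take (i+1))]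
      rw [List.sum_append, List.drop_eq_getElem_cons hjlen]
      rw [List.getElem_take]
      simp only [List.sum_cons]
      ring
    rw [List.sum_set, hsplit, if_pos hjlen, if_pos h, List.getD_eq_getElem d 0 hj]
    ring
  · rw [List.set_eq_of_length_le (by simp; omega)]
    simp [h]

-- node-to-position dict: every node of `order` gets a position in [s, s + length)
theorem pv_posfold_not_mem (l : List Int) : ∀ (s : Int) (d : PySem.Dict Int Int) (v : Int),
    v ∉ l →
    ((PySem.List.enumerate l s).foldl (fun d p => d.insert p.2 p.1) d).getD v 0 = d.getD v 0 := by
  induction l with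
  | nil => intro s d v _; simp [PySem.List.enumerate_nil]
  | cons x xs ih =>
    intro s d v hv
    rw [PySem.List.enumerate_cons]
    simp only [List.foldl_cons]
    rw [ih (s+1) _ v (by simp at hv; exact hv.2)]
    exact PySem.Dict.getD_insert_of_ne _ _ _ (by simp at hv; exact hv.1)

theorem pv_posfold_bound (l : List Int) : ∀ (s : Int) (d : PySem.Dict Int Int) (v : Int),
    v ∈ l →
    s ≤ ((PySem.List.enumerate l s).foldl (fun d p => d.insert p.2 p.1) d).getD v 0 ∧
      ((PySem.List.enumerate l s).foldl (fun d p => d.insert p.2 p.1) d).getD v 0 < s + l.length := by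
  induction l with
  | nil => intro _ _ _ h; simp at h
  | cons x xs ih =>
    intro s d v hv
    rw [PySem.List.enumerate_cons]
    simp only [List.foldl_cons]
    by_cases hx : v ∈ xs
    · have := ih (s+1) (d.insert x s) v hx
      constructor
      · omega
      · simp only [List.length_cons]; push_cast; omega
    · have hvx : v = x := by simp at hv; tauto
      subst hvx
      rw [pv_posfold_not_mem xs (s+1) _ v hx, PySem.Dict.getD_insert_self]
      simp only [List.length_cons]; push_cast; omega

theorem pv_posOf_bound (order : List Int) (v : Int) (hv : v ∈ order) :
    0 ≤ (pvPosOf order).getD v 0 ∧ (pvPosOf order).getD v 0 < (order.length : Int) := by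
  have := pv_posfold_bound order 0 PySem.Dict.empty v hv
  unfold pvPosOf
  omega

-- B's running maximum over qs starting at p
theorem pv_runmax_spec (qs : List Int) (p : Int) :
    p ≤ qs.foldl max p ∧ (∀ q ∈ qs, q ≤ qs.foldl max p) ∧
      (qs.foldl max p = p ∨ qs.foldl max p ∈ qs) := by
  induction qs generalizing p with
  | nil => simp
  | cons x xs ih =>
    simp only [List.foldl_cons]
    obtain ⟨h1, h2, h3⟩ := ih (p := max p x)
    refine ⟨by omega, ?_, ?_⟩
    · intro q hq
      rcases List.mem_cons.mp hq with rfl | hq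
      · omega
      · exact h2 q hq
    · rcases h3 with h3 | h3
      · rcases max_choice p x with h | h
        · exact Or.inl (h3.trans h)
        · exact Or.inr (List.mem_cons.mpr (Or.inl (h3.trans h)))
      · exact Or.inr (List.mem_cons_of_mem _ h3)

-- A's guard `cons_pos == []` coincides with B's `last == p`
theorem pv_runmax_filter_nil_iff (qs : List Int) (p : Int) :
    qs.filter (fun q => p < q) = [] ↔ qs.foldl max p = p := by
  obtain ⟨h1, h2, h3⟩ := pv_runmax_spec qs p
  rw [List.filter_eq_nil_iff]
  constructor
  · intro h
    rcases h3 with h3 | h3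
    · exact h3
    · have := h _ h3; simp at this; omega
  · intro h q hq
    have := h2 q hq; simp; omega

-- when a consumer lies beyond p, A's max of the filtered list is B's running maximum
theorem pv_runmax_max? (qs : List Int) (p : Int) (h : qs.foldl max p ≠ p) :
    (PySem.List.max? (qs.filter (fun q => p < q)) (fun y => y)).getD 0 = qs.foldl max p := by
  obtain ⟨h1, h2, h3⟩ := pv_runmax_spec qs p
  set F := qs.foldl max p with hF
  have hFq : F ∈ qs := h3.resolve_left h
  have hFf : F ∈ qs.filter (fun q => decide (p < q)) := by
    rw [List.mem_filter]; exact ⟨hFq, by simp; omega⟩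
  cases hmax : PySem.List.max? (qs.filter (fun q => decide (p < q))) (fun y => y) with
  | none => rw [PySem.List.max?_eq_none_iff] at hmax; rw [hmax] at hFf; simp at hFf
  | some m =>
    have hm1 : m ≤ F := h2 m (List.mem_filter.mp (PySem.List.max?_mem hmax)).1
    have hm2 : F ≤ m := PySem.List.max?_isMax hmax F hFf
    simp; omega

-- appending one span to B's span list
theorem pv_spanSum_append (spans : List (String × Int × Int × Int))
    (sp : String × Int × Int × Int) (i : Int) :
    pvSpanSum (spans ++ [sp]) i =
      pvSpanSum spans i + (if sp.2.2.1 ≤ i ∧ i < sp.2.2.2 then sp.2.1 else 0) := by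
  unfold pvSpanSum
  rw [List.filter_append]
  by_cases h : sp.2.2.1 ≤ i ∧ i < sp.2.2.2
  · rw [if_pos h]
    have : [sp].filter (fun sp => decide (sp.2.2.1 ≤ i) && decide (i < sp.2.2.2)) = [sp] := by
      simp [List.filter, h.1, h.2]
    rw [this]; simp
  · rw [if_neg h]
    have hc : (decide (sp.2.2.1 ≤ i) && decide (i < sp.2.2.2)) = false := by simpa using h
    have : [sp].filter (fun sp => decide (sp.2.2.1 ≤ i) && decide (i < sp.2.2.2)) = [] := by
      simp [List.filter, hc]
    rw [this]; simp

theorem pv_spanDict_append (spans : List (String × Int × Int × Int))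
    (sp : String × Int × Int × Int) :
    pvSpanDict (spans ++ [sp]) = (pvSpanDict spans).insert sp.1 (sp.2.2.1, sp.2.2.2) := by
  unfold pvSpanDict
  rw [List.foldl_append]
  rfl

-- the simulation relation: A's difference-array prefix sums = B's covering-span sums,
-- and A's val_span dict = the dict of B's span list
def pvInv (m : Nat) (st : List Int × PySem.Dict String (Int × Int))
    (spans : List (String × Int × Int × Int)) : Prop :=
  st.1.length = m + 1 ∧ st.2 = pvSpanDict spans ∧
    ∀ i : Nat, i < m → (st.1.take (i + 1)).sum = pvSpanSum spans (i : Int)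

theorem pv_step_pres (order : List Int) (m : Nat) (hm : order.length = m + 1)
    (vb : PySem.Dict String Int) (co : PySem.Dict String (List Int)) (vp : String × Int)
    (hpre : 0 < vb.getD vp.1 0 → vp.2 ∈ order ∧ ∀ c ∈ co.getD vp.1 [], c ∈ order)
    (st : List Int × PySem.Dict String (Int × Int)) (spans : List (String × Int × Int × Int))
    (hinv : pvInv m st spans) :
    pvInv m (pvStepA (m : Int) (pvPosOf order) vb co st vp)
      (pvSpanStep (pvPosOf order) vb co spans vp) := by
  obtain ⟨hdlen, hdict, hsum⟩ := hinv
  unfold pvStepA pvSpanStep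
  by_cases hb : vb.getD vp.1 0 ≤ 0
  · simp only [hb, if_pos, if_neg (by omega : ¬ (0 < vb.getD vp.1 0))]
    exact ⟨hdlen, hdict, hsum⟩
  · simp only [hb, if_false, if_pos (by omega : 0 < vb.getD vp.1 0)]
    obtain ⟨hmem, hcons⟩ := hpre (by omega)
    set pos := pvPosOf order with hpos
    set p := pos.getD vp.2 0 with hpdef
    have hpb : 0 ≤ p ∧ p < (order.length : Int) := pv_posOf_bound order vp.2 hmem
    set qs := (co.getD vp.1 []).map (fun c => pos.getD c 0) with hqs
    have hqb : ∀ q ∈ qs, 0 ≤ q ∧ q < (order.length : Int) := by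
      intro q hq
      rw [hqs, List.mem_map] at hq
      obtain ⟨cc, hcc, rfl⟩ := hq
      exact pv_posOf_bound order cc (hcons cc hcc)
    have hfold : (co.getD vp.1 []).foldl (fun a c => max a (pos.getD c 0)) p = qs.foldl max p := by
      rw [hqs, List.foldl_map]
    rw [hfold]
    set F := qs.foldl max p with hFdef
    by_cases hg : F = p
    · rw [if_pos ((pv_runmax_filter_nil_iff qs p).mpr hg), if_neg (by omega : ¬ p < F)]
      exact ⟨hdlen, hdict, hsum⟩
    · obtain ⟨hF1, hF2, hF3⟩ := pv_runmax_spec qs p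
      have hpF : p < F := by omega
      rw [if_neg (fun hnil => hg ((pv_runmax_filter_nil_iff qs p).mp hnil)), if_pos hpF,
          pv_runmax_max? qs p hg]
      have hFmem : F ∈ qs := hF3.resolve_left hg
      have hFb : 0 ≤ F ∧ F < (order.length : Int) := hqb F hFmem
      have hminF : min F (m : Int) = F := by rw [min_eq_left]; omega
      rw [hminF]
      obtain ⟨pn, hpn⟩ : ∃ pn : Nat, p = (pn : Int) := ⟨p.toNat, (Int.toNat_of_nonneg hpb.1).symm⟩
      obtain ⟨fn, hfn⟩ : ∃ fn : Nat, F = (fn : Int) := ⟨F.toNat, (Int.toNat_of_nonneg hFb.1).symm⟩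
      have hpn_lt : pn < fn := by omega
      have hfn_le : fn ≤ m := by omega
      refine ⟨?_, ?_, ?_⟩
      · simp only [hpn, hfn, PySem.List.pySetD_natCast]
        simp [hdlen]
      · rw [pv_spanDict_append, ← hdict]
      · intro i hi
        rw [pv_spanSum_append, ← hsum i hi]
        simp only [hpn, hfn, PySem.List.pySetD_natCast, PySem.List.pyGetD_natCast]
        rw [pv_sum_take_set _ fn _ (by simp; omega) i,
            pv_sum_take_set st.1 pn _ (by omega) i]
        have hcast : ((pn : Int) ≤ (i : Int) ∧ (i : Int) < (fn : Int)) ↔ (pn ≤ i ∧ i < fn) := by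
          constructor <;> intro h <;> constructor <;> omega
        split_ifs with h1 h2 h3 h4 h5 <;> simp_all <;> omega

theorem pv_fold_pres (order : List Int) (m : Nat) (hm : order.length = m + 1)
    (vb : PySem.Dict String Int) (co : PySem.Dict String (List Int)) :
    ∀ (L : List (String × Int)) (st : List Int × PySem.Dict String (Int × Int))
      (spans : List (String × Int × Int × Int)),
    (∀ vp ∈ L, 0 < vb.getD vp.1 0 → vp.2 ∈ order ∧ ∀ c ∈ co.getD vp.1 [], c ∈ order) →
    pvInv m st spans →
    pvInv m (L.foldl (pvStepA (m : Int) (pvPosOf order) vb co) st)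
      (L.foldl (pvSpanStep (pvPosOf order) vb co) spans) := by
  intro L
  induction L with
  | nil => intro st spans _ hinv; exact hinv
  | cons vp L ih =>
    intro st spans hpre hinv
    simp only [List.foldl_cons]
    exact ih _ _ (fun vq hq => hpre vq (List.mem_cons_of_mem _ hq))
      (pv_step_pres order m hm vb co vp (hpre vp List.mem_cons_self) st spans hinv)

-- A's final prefix-sum pass
theorem pv_prefix_fold (d : List Int) (m : Nat) (hm : m ≤ d.length) (r0 : Int) (acc : List Int) :
    (PySem.List.pyRange 0 (m : Int) 1).foldl
        (fun (rc : Int × List Int) i =>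
          (rc.1 + PySem.List.pyGetD d i 0, rc.2 ++ [rc.1 + PySem.List.pyGetD d i 0]))
        (r0, acc)
      = (r0 + (d.take m).sum, acc ++ (List.range m).map (fun i => r0 + (d.take (i + 1)).sum)) := by
  induction m with
  | zero => simp [PySem.List.pyRange_one_eq_nil]
  | succ m ih =>
    have hc : ((m + 1 : Nat) : Int) = (m : Int) + 1 := by push_cast; ring
    rw [hc, PySem.List.pyRange_one_succ_right (by positivity), List.foldl_append,
        ih (by omega)]
    simp only [List.foldl_cons, List.foldl_nil]
    rw [PySem.List.pyGetD_natCast, List.getD_eq_getElem _ 0 (by omega),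
        List.range_succ, List.map_append]
    simp
    rw [List.sum_take_succ d m (by omega)]
    ring

-- ===== VERDICT (by name: the statement is the Claim_ definition above) =====
theorem boundary_costs_spec : Claim_equal_boundary_costs := by
  intro order producer_of consumers_of value_bytes hdom hpre
  unfold Spec_boundary_costs boundary_costs boundary_costs_alt
  simp only [PySem.List.len_eq]
  by_cases hN : (order.length : Int) ≤ 1
  · rw [if_pos (by omega : max 0 ((order.length : Int) - 1) = 0), if_pos hN]
  · rw [if_neg (by omega : ¬ max 0 ((order.length : Int) - 1) = 0), if_neg hN]
    have hN2 : 2 ≤ order.length := by omega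
    obtain ⟨m, hmm⟩ : ∃ m : Nat, order.length = m + 1 := ⟨order.length - 1, by omega⟩
    have hMm : max 0 ((order.length : Int) - 1) = (m : Int) := by rw [hmm]; push_cast; omega
    have hMm' : (order.length : Int) - 1 = (m : Int) := by rw [hmm]; push_cast; omega
    rw [hMm, hMm']
    have ht1 : ((m : Int) + 1).toNat = m + 1 := by omega
    rw [ht1]
    have hinv0 : pvInv m (List.replicate (m + 1) 0, PySem.Dict.empty) [] := by
      refine ⟨by simp, rfl, fun i hi => ?_⟩
      simp [List.take_replicate, pvSpanSum]
    obtain ⟨hdlen, hdict, hsum⟩ :=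
      pv_fold_pres order m hmm (PySem.Dict.ofList value_bytes) (PySem.Dict.ofList consumers_of)
        (PySem.Dict.ofList producer_of).items (List.replicate (m + 1) 0, PySem.Dict.empty)
        [] (hpre hN2) hinv0
    rw [pv_prefix_fold _ m (by omega) 0 []]
    refine Prod.ext ?_ (by rw [hdict])
    simp only [List.nil_append]
    rw [PySem.List.pyRange_one]
    simp only [Int.sub_zero, Int.toNat_natCast, List.map_map]
    apply List.map_congr_left
    intro i hi
    simp only [List.mem_range] at hi
    simp only [Function.comp_apply, zero_add]
    exact hsum i hi
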